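-- pv_equiv track=rewrite | github.com/gacky1601/NTUT_CSIE_2021f_PD | Homework/27.py | Check
-- ===== SOURCE A (Python) =====
-- def Check(WordToCheck):
--     special_letter=['~','!','@','#','$','%','^','&','*','<','>','_','+','=']
--     small=0
--     capital=0
--     digit=0
--     special=0
--     continuous=0
--
--     for i in WordToCheck:
--         if i.islower():
--             small+=1
--         elif i.isupper():
--             capital+=1
--         elif i.isdigit():
--             digit+=1
--         elif i in special_letter:
--             special+=1
--     ##Add space from begining and end of WordToCheck prevent from counting statement(WordToCheck[-1].isdigit() and WordToCheck[1].isdigit())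
--     WordToCheck1 = ' ' + WordToCheck + ' '
--     for i in range (1,len(WordToCheck1)):
--         if WordToCheck1[i].isdigit():
--             if not WordToCheck1[i-1].isdigit() and not WordToCheck1[i+1].isdigit():
--                 continuous+=1
--
--     if continuous>=5:
--         continuous=1
--     else:
--         continuous=0
--
--     return [small,capital,digit,special,continuous]
-- ===== SOURCE B (Python) =====
-- def Check(WordToCheck):
--     special_letter = '~!@#$%^&*<>_+='
--     small = capital = digit = special = 0
--     iso = 0      # number of isolated (length-1) digit runs
--     run = 0      # length of the current digit run
--     for c in WordToCheck:
--         if c.islower():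
--             small += 1
--         elif c.isupper():
--             capital += 1
--         elif c.isdigit():
--             digit += 1
--         elif c in special_letter:
--             special += 1
--         if c.isdigit():
--             run += 1
--         else:
--             if run == 1:
--                 iso += 1
--             run = 0
--     if run == 1:
--         iso += 1
--     return [small, capital, digit, special, 1 if iso >= 5 else 0]
-- ===== Notes on version B (the rewrite author's own statement) =====
-- stated objective: simpler
-- what changed: Single pass with a digit-run-length counter replaces A's second pass over a space-padded copy with i-1/i/i+1 index lookups; isolated digits are counted when a run ends with length 1.
import Mathlib
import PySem

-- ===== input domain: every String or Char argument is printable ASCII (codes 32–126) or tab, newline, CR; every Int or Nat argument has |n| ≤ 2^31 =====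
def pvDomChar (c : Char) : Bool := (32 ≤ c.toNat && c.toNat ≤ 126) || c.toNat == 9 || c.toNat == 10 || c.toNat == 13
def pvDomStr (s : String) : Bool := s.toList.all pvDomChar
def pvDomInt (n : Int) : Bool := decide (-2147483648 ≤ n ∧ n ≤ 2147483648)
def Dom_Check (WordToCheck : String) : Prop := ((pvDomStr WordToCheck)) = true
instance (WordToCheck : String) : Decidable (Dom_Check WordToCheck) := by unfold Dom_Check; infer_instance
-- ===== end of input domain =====

-- B replaces A's second pass over a space-padded copy (neighbour lookups at i-1/i/i+1)
-- by a single pass that tracks the length of the current digit run; same return value.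

-- ===== PORT A =====
-- the category-tally loop body of A (if/elif chain, same order)
def aCatStep (special_letter : List Char) (st : Int × Int × Int × Int) (i : Char) : Int × Int × Int × Int :=
  if PySem.Chars.islower i then (st.1 + 1, st.2.1, st.2.2.1, st.2.2.2)
  else if PySem.Chars.isupper i then (st.1, st.2.1 + 1, st.2.2.1, st.2.2.2)
  else if PySem.Chars.isdigit i then (st.1, st.2.1, st.2.2.1 + 1, st.2.2.2)
  else if special_letter.contains i then (st.1, st.2.1, st.2.2.1, st.2.2.2 + 1)
  else st

-- body of A's index loop; W1[i] is in range for every i in range(1, len(W1)), and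
-- W1[i+1] is only read when W1[i] is a digit (so i+1 < len(W1)): pyGetD with default ' '
-- is exact here (Python never raises in this loop)
def aContStep (W1 : List Char) (acc : Int) (i : Int) : Int :=
  if PySem.Chars.isdigit (PySem.List.pyGetD W1 i ' ') then
    if !(PySem.Chars.isdigit (PySem.List.pyGetD W1 (i - 1) ' '))
       && !(PySem.Chars.isdigit (PySem.List.pyGetD W1 (i + 1) ' ')) then acc + 1 else acc
  else acc

def Check (WordToCheck : String) : List Int :=
  let special_letter : List Char := ['~','!','@','#','$','%','^','&','*','<','>','_','+','=']
  let st := WordToCheck.toList.foldl (aCatStep special_letter) (0, 0, 0, 0)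
  -- WordToCheck1 = ' ' + WordToCheck + ' '
  let W1 : List Char := ' ' :: WordToCheck.toList ++ [' ']
  let continuous : Int := (PySem.List.pyRange 1 (W1.length : Int) 1).foldl (aContStep W1) 0
  let continuous : Int := if continuous ≥ 5 then 1 else 0
  [st.1, st.2.1, st.2.2.1, st.2.2.2, continuous]

-- ===== PORT B =====
-- single-pass loop body: category tally plus digit-run tracking (run, iso)
def bStep (special_letter : List Char) (st : Int × Int × Int × Int × Int × Int) (c : Char) :
    Int × Int × Int × Int × Int × Int :=
  let cat : Int × Int × Int × Int :=
    if PySem.Chars.islower c then (st.1 + 1, st.2.1, st.2.2.1, st.2.2.2.1)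
    else if PySem.Chars.isupper c then (st.1, st.2.1 + 1, st.2.2.1, st.2.2.2.1)
    else if PySem.Chars.isdigit c then (st.1, st.2.1, st.2.2.1 + 1, st.2.2.2.1)
    else if special_letter.contains c then (st.1, st.2.1, st.2.2.1, st.2.2.2.1 + 1)
    else (st.1, st.2.1, st.2.2.1, st.2.2.2.1)
  if PySem.Chars.isdigit c then
    (cat.1, cat.2.1, cat.2.2.1, cat.2.2.2, st.2.2.2.2.1 + 1, st.2.2.2.2.2)
  else
    (cat.1, cat.2.1, cat.2.2.1, cat.2.2.2, 0,
      if st.2.2.2.2.1 = 1 then st.2.2.2.2.2 + 1 else st.2.2.2.2.2)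

def Check_alt (WordToCheck : String) : List Int :=
  -- the Python string '~!@#$%^&*<>_+=' as its character list (membership test is the same)
  let special_letter : List Char := ['~','!','@','#','$','%','^','&','*','<','>','_','+','=']
  let st := WordToCheck.toList.foldl (bStep special_letter) (0, 0, 0, 0, 0, 0)
  let iso : Int := if st.2.2.2.2.1 = 1 then st.2.2.2.2.2 + 1 else st.2.2.2.2.2
  [st.1, st.2.1, st.2.2.1, st.2.2.2.1, if iso ≥ 5 then 1 else 0]

-- ===== PRECONDITION & SPEC =====
def Spec_Check (WordToCheck : String) (out : List Int) : Prop := out = Check_alt WordToCheck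
instance (WordToCheck : String) (out : List Int) : Decidable (Spec_Check WordToCheck out) := by unfold Spec_Check; infer_instance

-- ===== CLAIM (what is proved, stated in full; the proofs are below) =====
def Claim_equal_Check : Prop := ∀ (WordToCheck : String), Dom_Check WordToCheck → Spec_Check WordToCheck (Check WordToCheck)

-- ===== LEMMAS AND PROOFS =====

-- number of isolated digits in a list, scanning with a "previous char was a digit" flag
-- and one-char lookahead (end of list behaves like a space)
def isoT (prev : Bool) : List Char → Int
  | [] => 0
  | c :: cs =>
      (if PySem.Chars.isdigit c ∧ ¬ prev ∧ ¬ PySem.Chars.isdigit (cs.headD ' ') then (1 : Int) else 0)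
        + isoT (PySem.Chars.isdigit c) cs

lemma isoT_cons (prev : Bool) (c : Char) (cs : List Char) : isoT prev (c :: cs)
    = (if PySem.Chars.isdigit c ∧ ¬ prev ∧ ¬ PySem.Chars.isdigit (cs.headD ' ') then (1 : Int) else 0)
        + isoT (PySem.Chars.isdigit c) cs := rfl

lemma headD_append_space (M : List Char) : (M ++ [' ']).headD ' ' = M.headD ' ' := by
  cases M <;> simp

lemma isoT_append_space (M : List Char) : ∀ prev, isoT prev (M ++ [' ']) = isoT prev M := by
  induction M with
  | nil =>
      intro prev
      have hsp : PySem.Chars.isdigit ' ' = false := by decide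
      simp [isoT, hsp]
  | cons c M' ih =>
      intro prev
      rw [List.cons_append, isoT_cons, isoT_cons, headD_append_space, ih]

lemma cont_loop (M : List Char) : ∀ (L : List Char) (j : Nat) (p : Char) (acc : Int),
    L.drop j = p :: M →
    (List.range M.length).foldl (fun (a : Int) (k : Nat) => aContStep L a ((j : Int) + 1 + (k : Int))) acc
      = acc + isoT (PySem.Chars.isdigit p) M := by
  induction M with
  | nil => intro L j p acc _; simp [isoT]
  | cons c M' ih =>
      intro L j p acc h
      have hL0 : L[j]? = some p := by
        have h0 : (L.drop j)[(0 : Nat)]? = some p := by rw [h]; rfl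
        simpa [List.getElem?_drop] using h0
      have hL1 : L[j + 1]? = some c := by
        have h0 : (L.drop j)[(1 : Nat)]? = some c := by rw [h]; rfl
        simpa [List.getElem?_drop] using h0
      have hL2 : L[j + 2]? = M'[0]? := by
        have h0 : (L.drop j)[(2 : Nat)]? = M'[0]? := by rw [h]; rfl
        simpa [List.getElem?_drop] using h0
      have hdrop : L.drop (j + 1) = c :: M' := by
        have h1 : L.drop (j + 1) = (L.drop j).drop 1 := by rw [← List.drop_drop]
        simp [h1, h]
      have hstep : aContStep L acc ((j : Int) + 1)
          = acc + (if PySem.Chars.isdigit c ∧ ¬ PySem.Chars.isdigit p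
                      ∧ ¬ PySem.Chars.isdigit (M'.headD ' ') then (1 : Int) else 0) := by
        have e0 : ((j : Int) + 1) = (((j + 1 : Nat)) : Int) := by push_cast; ring
        rw [e0]; unfold aContStep
        have e1 : (((j + 1 : Nat)) : Int) - 1 = ((j : Nat) : Int) := by push_cast; ring
        have e2 : (((j + 1 : Nat)) : Int) + 1 = (((j + 2 : Nat)) : Int) := by push_cast; ring
        rw [e1, e2]
        simp only [PySem.List.pyGetD_natCast, List.getD_eq_getElem?_getD, hL0, hL1, hL2]
        have e3 : (M'[0]?).getD ' ' = M'.headD ' ' := by cases M' <;> rfl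
        simp only [Option.getD_some, e3]
        split_ifs <;> simp_all <;> try omega
      simp only [List.length_cons, List.range_succ_eq_map, List.foldl_cons, List.foldl_map,
        Nat.cast_zero, add_zero, hstep]
      have hfg : (fun (a : Int) (k : Nat) => aContStep L a ((j : Int) + 1 + ((Nat.succ k : Nat) : Int)))
          = (fun (a : Int) (k : Nat) => aContStep L a (((j + 1 : Nat) : Int) + 1 + (k : Int))) := by
        funext a k; congr 1; push_cast; ring
      rw [hfg, ih L (j + 1) c _ hdrop, isoT_cons]
      ring

lemma bstep_cat_step (sl : List Char) (s c d sp run iso : Int) (x : Char) :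
    ((bStep sl (s, c, d, sp, run, iso) x).1, (bStep sl (s, c, d, sp, run, iso) x).2.1,
     (bStep sl (s, c, d, sp, run, iso) x).2.2.1, (bStep sl (s, c, d, sp, run, iso) x).2.2.2.1)
      = aCatStep sl (s, c, d, sp) x := by
  unfold bStep aCatStep
  split_ifs <;> rfl

lemma bstep_cats (cs : List Char) : ∀ (sl : List Char) (s c d sp run iso : Int),
    (fun r : Int × Int × Int × Int × Int × Int => (r.1, r.2.1, r.2.2.1, r.2.2.2.1))
        (cs.foldl (bStep sl) (s, c, d, sp, run, iso))
      = cs.foldl (aCatStep sl) (s, c, d, sp) := by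
  induction cs with
  | nil => intro sl s c d sp run iso; rfl
  | cons c0 cs' ih =>
      intro sl s c d sp run iso
      simp only [List.foldl_cons]
      rw [← bstep_cat_step sl s c d sp run iso c0]
      exact ih sl (bStep sl (s, c, d, sp, run, iso) c0).1 (bStep sl (s, c, d, sp, run, iso) c0).2.1
        (bStep sl (s, c, d, sp, run, iso) c0).2.2.1 (bStep sl (s, c, d, sp, run, iso) c0).2.2.2.1
        (bStep sl (s, c, d, sp, run, iso) c0).2.2.2.2.1 (bStep sl (s, c, d, sp, run, iso) c0).2.2.2.2.2

lemma bstep_iso (cs : List Char) : ∀ (sl : List Char) (s c d sp run iso : Int), 0 ≤ run →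
    (fun r : Int × Int × Int × Int × Int × Int =>
        if r.2.2.2.2.1 = 1 then r.2.2.2.2.2 + 1 else r.2.2.2.2.2)
      (cs.foldl (bStep sl) (s, c, d, sp, run, iso))
    = iso + (if run = 1 ∧ ¬ PySem.Chars.isdigit (cs.headD ' ') then (1 : Int) else 0)
        + isoT (decide (run ≠ 0)) cs := by
  induction cs with
  | nil =>
      intro sl s c d sp run iso _
      have hsp : PySem.Chars.isdigit ' ' = false := by decide
      simp only [List.foldl_nil, List.headD, isoT, hsp]
      split_ifs <;> simp_all <;> try omega
  | cons c0 cs' ih =>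
      intro sl s c d sp run iso hrun
      simp only [List.foldl_cons]
      by_cases hd : PySem.Chars.isdigit c0
      · have hrun' : (bStep sl (s, c, d, sp, run, iso) c0).2.2.2.2.1 = run + 1 := by
          simp [bStep, hd]
        have hiso' : (bStep sl (s, c, d, sp, run, iso) c0).2.2.2.2.2 = iso := by
          simp [bStep, hd]
        have hrec := ih sl (bStep sl (s, c, d, sp, run, iso) c0).1
          (bStep sl (s, c, d, sp, run, iso) c0).2.1 (bStep sl (s, c, d, sp, run, iso) c0).2.2.1
          (bStep sl (s, c, d, sp, run, iso) c0).2.2.2.1 (bStep sl (s, c, d, sp, run, iso) c0).2.2.2.2.1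
          (bStep sl (s, c, d, sp, run, iso) c0).2.2.2.2.2 (by rw [hrun']; omega)
        simp only [Prod.mk.eta] at hrec
        rw [hrec, hrun', hiso', isoT_cons]
        have hprev : decide (run + 1 ≠ 0) = true := by simp; omega
        rw [hprev]
        simp only [List.headD, hd, decide_eq_true_eq, Bool.not_eq_true]
        split_ifs <;> simp_all <;> try omega
      · have hrun' : (bStep sl (s, c, d, sp, run, iso) c0).2.2.2.2.1 = 0 := by
          simp [bStep, hd]
        have hiso' : (bStep sl (s, c, d, sp, run, iso) c0).2.2.2.2.2
            = (if run = 1 then iso + 1 else iso) := by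
          simp [bStep, hd]
        have hrec := ih sl (bStep sl (s, c, d, sp, run, iso) c0).1
          (bStep sl (s, c, d, sp, run, iso) c0).2.1 (bStep sl (s, c, d, sp, run, iso) c0).2.2.1
          (bStep sl (s, c, d, sp, run, iso) c0).2.2.2.1 (bStep sl (s, c, d, sp, run, iso) c0).2.2.2.2.1
          (bStep sl (s, c, d, sp, run, iso) c0).2.2.2.2.2 (by rw [hrun'])
        simp only [Prod.mk.eta] at hrec
        rw [hrec, hrun', hiso', isoT_cons]
        simp only [List.headD, hd, decide_eq_true_eq, Bool.not_eq_true]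
        split_ifs <;> simp_all <;> try omega

-- A's index loop over the padded word computes isoT false (word ++ [' '])
lemma check_cont (W : List Char) :
    (PySem.List.pyRange 1 ((' ' :: W ++ [' ']).length : Int) 1).foldl
        (aContStep (' ' :: W ++ [' '])) 0
      = isoT false W := by
  set L : List Char := ' ' :: W ++ [' '] with hLdef
  rw [PySem.List.pyRange_one]
  have hn : ((L.length : Int) - 1).toNat = (W ++ [' ']).length := by
    simp [hLdef]
  rw [hn, List.foldl_map]
  have hfg : (fun (a : Int) (k : Nat) => aContStep L a (1 + (k : Int)))
      = (fun (a : Int) (k : Nat) => aContStep L a (((0 : Nat) : Int) + 1 + (k : Int))) := by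
    funext a k; congr 1
  rw [hfg]
  rw [cont_loop (W ++ [' ']) L 0 ' ' 0 (by simp [hLdef])]
  have hsp : PySem.Chars.isdigit ' ' = false := by decide
  simp [hsp, isoT_append_space]

theorem Check_eq_alt (W : String) : Check W = Check_alt W := by
  unfold Check Check_alt
  have hcats := bstep_cats W.toList
    ['~','!','@','#','$','%','^','&','*','<','>','_','+','='] 0 0 0 0 0 0
  have hiso := bstep_iso W.toList
    ['~','!','@','#','$','%','^','&','*','<','>','_','+','='] 0 0 0 0 0 0 (le_refl 0)
  simp only at hcats hiso
  have hcont := check_cont W.toList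
  simp only [hcont]
  have h5 : (if (0 : Int) = 1 ∧ ¬ PySem.Chars.isdigit (W.toList.headD ' ') then (1 : Int) else 0)
      = 0 := by simp
  rw [h5] at hiso
  simp only [zero_add] at hiso
  have hprev0 : (decide ((0 : Int) ≠ 0)) = false := by decide
  rw [hprev0] at hiso
  simp [← hcats, hiso]

-- ===== VERDICT (by name: the statement is the Claim_ definition above) =====
theorem Check_spec : Claim_equal_Check := by
  intro W _
  unfold Spec_Check
  exact Check_eq_alt W
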